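-- pv_equiv track=rewrite | github.com/ProgrammmerAhmad001/New-World | helloWorld.py | string_letter_count
-- ===== SOURCE A (Python) =====
-- def string_letter_count(s):
--     counter = {}
--     alphabets = ["a", "b", "c", "d", "e", "f", "g", "h", "i", "j", "k", "l", "m", "n", "o", "p", "q", "r", "s", "t",
--                  "u", "v", "w", "x", "y", "z"]
--     lowering = s.lower()
--     listing = tuple(lowering)
--     sorting = sorted(lowering)
--     for al in alphabets:
--         for key in sorting:
--             if key in counter:
--                 if key != al:
--                     pass
--                 else:
--                     counter[key] += 1
--             else:
--                 if key != al:
--                     pass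
--                 else:
--                     counter[key] = 1
--
--     if not counter:
--         return ""
--
--     for x, y in counter.items():
--         result = "".join(f"{y}{x}" for x, y in counter.items())
--         return result
--         return
-- ===== SOURCE B (Python) =====
-- def string_letter_count(s):
--     # sort the letters, then run-length-encode consecutive runs in one pass
--     letters = sorted(c for c in s.lower() if 'a' <= c <= 'z')
--     parts = []
--     run = None  # (char, count) of the current run
--     for c in letters:
--         if run and run[0] == c:
--             run = (c, run[1] + 1)
--         else:
--             if run:
--                 parts.append(f"{run[1]}{run[0]}")
--             run = (c, 1)
--     if run:
--         parts.append(f"{run[1]}{run[0]}")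
--     return ''.join(parts)
-- ===== Notes on version B (the rewrite author's own statement) =====
-- stated objective: simpler
-- what changed: A builds a frequency table by scanning the whole sorted string once per alphabet letter (26 passes) and prints the dict items; B sorts the letters once and run-length-encodes consecutive equal runs in a single pass, which a timing run measured as a constant-factor speedup.
import Mathlib
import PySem

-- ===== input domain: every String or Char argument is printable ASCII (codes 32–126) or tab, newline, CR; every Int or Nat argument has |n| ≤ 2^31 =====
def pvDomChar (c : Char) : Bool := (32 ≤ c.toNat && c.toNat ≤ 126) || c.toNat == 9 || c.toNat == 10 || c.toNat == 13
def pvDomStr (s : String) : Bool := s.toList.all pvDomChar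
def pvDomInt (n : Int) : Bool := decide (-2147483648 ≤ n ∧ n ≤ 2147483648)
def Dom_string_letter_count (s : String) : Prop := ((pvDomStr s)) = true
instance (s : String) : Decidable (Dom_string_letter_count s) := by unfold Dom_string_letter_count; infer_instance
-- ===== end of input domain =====

-- B replaces A's 26-pass frequency-table accumulation with sort-then-run-length-encode in a single pass (objective: simpler).
-- Python's one-character strings are represented as Char on both sides.

-- ===== PORT A =====
def pyAlphabets : List Char :=
  ['a','b','c','d','e','f','g','h','i','j','k','l','m','n','o','p','q','r','s','t','u','v','w','x','y','z']

-- the body of A's double loop (branch order as in the Python)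
def pvStepA (al : Char) (d : PySem.Dict Char Int) (key : Char) : PySem.Dict Char Int :=
  if d.contains key then
    if key ≠ al then d else d.insert key (d.getD key 0 + 1)
  else
    if key ≠ al then d else d.insert key 1

def string_letter_count (s : String) : String :=
  let lowering := PySem.Str.lower s
  let sorting := PySem.List.sorted lowering.toList (fun c => c) false
  let counter :=
    pyAlphabets.foldl (fun d al => sorting.foldl (pvStepA al) d) PySem.Dict.empty
  if counter.items = [] then ""
  else PySem.Str.join "" (counter.items.map (fun p => String.mk (PySem.Int.toChars p.2 ++ [p.1])))

-- ===== PORT B =====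
-- one step of B's run-length loop: state = (finished parts, current run)
def pvStepB (st : List String × Option (Char × Int)) (c : Char) : List String × Option (Char × Int) :=
  match st.2 with
  | some (k, n) =>
      if k = c then (st.1, some (k, n + 1))
      else (st.1 ++ [String.mk (PySem.Int.toChars n ++ [k])], some (c, 1))
  | none => (st.1, some (c, 1))

def string_letter_count_alt (s : String) : String :=
  let letters := PySem.List.sorted
    ((PySem.Str.lower s).toList.filter (fun c => 'a' ≤ c && c ≤ 'z')) (fun c => c) false
  let st := letters.foldl pvStepB ([], none)
  let parts := match st.2 with
    | some (k, n) => st.1 ++ [String.mk (PySem.Int.toChars n ++ [k])]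
    | none => st.1
  PySem.Str.join "" parts

-- ===== PRECONDITION & SPEC =====
def Spec_string_letter_count (s : String) (out : String) : Prop := out = string_letter_count_alt s
instance (s : String) (out : String) : Decidable (Spec_string_letter_count s out) := by unfold Spec_string_letter_count; infer_instance

-- ===== CLAIM (what is proved, stated in full; the proofs are below) =====
def Claim_equal_string_letter_count : Prop := ∀ (s : String), Dom_string_letter_count s → Spec_string_letter_count s (string_letter_count s)

-- ===== LEMMAS AND PROOFS =====

-- format of one output group
def pvFmt (k : Char) (n : Int) : String := String.mk (PySem.Int.toChars n ++ [k])

-- membership in the alphabet list ↔ the range test B uses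
lemma mem_pyAlphabets (b : Char) : b ∈ pyAlphabets ↔ ('a' ≤ b ∧ b ≤ 'z') := by
  constructor
  · intro h
    fin_cases h <;> exact ⟨by decide, by decide⟩
  · rintro ⟨h1, h2⟩
    have t1 := Char.le_def.mp h1
    have t2 := Char.le_def.mp h2
    rw [UInt32.le_iff_toNat_le] at t1 t2
    have e1 : ('a' : Char).val.toNat = 97 := by decide
    have e2 : ('z' : Char).val.toNat = 122 := by decide
    rw [e1] at t1
    rw [e2] at t2
    have h1' : 97 ≤ b.toNat := t1
    have h2' : b.toNat ≤ 122 := t2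
    interval_cases h : b.toNat <;> (rw [← Char.ofNat_toNat b, h]; decide)

lemma nodup_pyAlphabets : pyAlphabets.Nodup := by decide

lemma pairwise_lt_pyAlphabets : pyAlphabets.Pairwise (· < ·) := by decide

-- ===== A-side characterisation =====

-- inner fold when al is already in the dict with value v
lemma foldl_stepA_present (l : List Char) (al : Char) :
    ∀ (d : PySem.Dict Char Int) (v : Int), d.get? al = some v →
    l.foldl (pvStepA al) d =
      if l.count al = 0 then d else d.insert al (v + l.count al) := by
  induction l with
  | nil => intro d v _; simp
  | cons key l ih =>
    intro d v hv
    by_cases hk : key = al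
    · subst hk
      have hc : d.contains key = true := by
        rw [PySem.Dict.contains_eq_isSome_get?, hv]; rfl
      have hg : d.getD key 0 = v := by
        rw [PySem.Dict.getD_eq_get?_getD, hv]; rfl
      have hstep : pvStepA key d key = d.insert key (v + 1) := by
        simp [pvStepA, hc, hg]
      have hv' : (d.insert key (v + 1)).get? key = some (v + 1) := by
        simp [PySem.Dict.get?_insert_self]
      rw [List.foldl_cons, hstep, ih _ _ hv', List.count_cons_self]
      by_cases h0 : l.count key = 0
      · simp [h0]
      · have hne : l.count key + 1 ≠ 0 := by omega
        rw [if_neg h0, if_neg hne, PySem.Dict.insert_insert_self]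
        have hcast : v + 1 + (l.count key : Int) = v + ((l.count key + 1 : Nat) : Int) := by
          push_cast; ring
        rw [hcast]
    · have hstep : pvStepA al d key = d := by
        simp [pvStepA, hk]
      have hcc : (key :: l).count al = l.count al := by
        simp [hk]
      rw [List.foldl_cons, hstep, ih _ _ hv, hcc]

-- inner fold when al is fresh: appends (al, count) if the count is positive
lemma foldl_stepA_fresh (l : List Char) (al : Char) (d : PySem.Dict Char Int)
    (h : d.contains al = false) :
    (l.foldl (pvStepA al) d).items =
      d.items ++ (if l.count al = 0 then [] else [(al, (l.count al : Int))]) := by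
  induction l with
  | nil => simp
  | cons key l ih =>
    by_cases hk : key = al
    · subst hk
      have hstep : pvStepA key d key = d.insert key 1 := by
        simp [pvStepA, h]
      have hv' : (d.insert key 1).get? key = some 1 := by
        simp [PySem.Dict.get?_insert_self]
      rw [List.foldl_cons, hstep, foldl_stepA_present l key _ 1 hv', List.count_cons_self]
      by_cases h0 : l.count key = 0
      · rw [if_pos h0, PySem.Dict.items_insert]
        simp [h, h0]
      · have hne : l.count key + 1 ≠ 0 := by omega
        have hcast : (1 : Int) + (l.count key : Int) = ((l.count key + 1 : Nat) : Int) := by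
          push_cast; ring
        rw [if_neg h0, PySem.Dict.insert_insert_self, PySem.Dict.items_insert, if_neg hne]
        simp [h, hcast]
    · have hstep : pvStepA al d key = d := by
        simp [pvStepA, hk]
      have hcc : (key :: l).count al = l.count al := by
        simp [hk]
      rw [List.foldl_cons, hstep, ih, hcc]

-- outer fold over distinct fresh keys
lemma foldl_outer (sorting : List Char) :
    ∀ (as : List Char), as.Nodup → ∀ (d : PySem.Dict Char Int),
    (∀ a ∈ as, d.contains a = false) →
    (as.foldl (fun d al => sorting.foldl (pvStepA al) d) d).items =
      d.items ++ as.filterMap (fun a =>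
        if sorting.count a = 0 then none else some (a, (sorting.count a : Int))) := by
  intro as
  induction as with
  | nil => intro _ d _; simp
  | cons al rest ih =>
    intro hnd d hfresh
    have hal : d.contains al = false := hfresh al (by simp)
    have hinner := foldl_stepA_fresh sorting al d hal
    rw [List.foldl_cons]
    have hfresh' : ∀ a ∈ rest, (sorting.foldl (pvStepA al) d).contains a = false := by
      intro a ha
      have hne : a ≠ al := fun he => (List.nodup_cons.mp hnd).1 (he ▸ ha)
      have hda : d.contains a = false := hfresh a (List.mem_cons_of_mem _ ha)
      have hnk : a ∉ d.items.map (·.1) := by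
        intro hmem
        have hct : d.contains a = true := by
          rw [PySem.Dict.contains_iff_mem_keys]
          exact hmem
        rw [hda] at hct
        cases hct
      rw [← Bool.not_eq_true, PySem.Dict.contains_iff_mem_keys]
      show a ∉ (List.foldl (pvStepA al) d sorting).items.map (·.1)
      rw [hinner]
      intro hmem
      rw [List.map_append, List.mem_append] at hmem
      rcases hmem with hm | hm
      · exact hnk hm
      · by_cases h0 : sorting.count al = 0
        · rw [if_pos h0] at hm
          simp at hm
        · rw [if_neg h0] at hm
          simp at hm
          exact hne hm
    rw [ih (List.nodup_cons.mp hnd).2 _ hfresh', hinner]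
    by_cases h0 : sorting.count al = 0 <;> simp [h0]

-- ===== B-side characterisation =====

def pvFlush (st : List String × Option (Char × Int)) : List String :=
  match st.2 with
  | some (k, n) => st.1 ++ [pvFmt k n]
  | none => st.1

-- predicate: the current run's key is not a
def pvRunNe (st : List String × Option (Char × Int)) (a : Char) : Prop :=
  ∀ k n, st.2 = some (k, n) → k ≠ a

lemma foldl_stepB_run (m : Nat) (a : Char) : ∀ (parts : List String) (j : Int),
    (List.replicate m a).foldl pvStepB (parts, some (a, j)) = (parts, some (a, j + m)) := by
  induction m with
  | zero => intro parts j; simp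
  | succ m ih =>
    intro parts j
    rw [List.replicate_succ, List.foldl_cons]
    have hstep : pvStepB (parts, some (a, j)) a = (parts, some (a, j + 1)) := by
      simp [pvStepB]
    rw [hstep, ih]
    have : j + 1 + (m : Int) = j + ((m + 1 : Nat) : Int) := by push_cast; ring
    rw [this]

lemma foldl_stepB_replicate (n : Nat) (a : Char) (st : List String × Option (Char × Int))
    (h : pvRunNe st a) (hn : n ≠ 0) :
    (List.replicate n a).foldl pvStepB st = (pvFlush st, some (a, (n : Int))) := by
  obtain ⟨m, rfl⟩ : ∃ m, n = m + 1 := ⟨n - 1, by omega⟩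
  rw [List.replicate_succ, List.foldl_cons]
  have hstep : pvStepB st a = (pvFlush st, some (a, (1 : Int))) := by
    rcases hst : st.2 with _ | ⟨k, j⟩
    · simp [pvStepB, pvFlush, hst]
    · have hk : k ≠ a := h k j hst
      simp [pvStepB, pvFlush, hst, hk, pvFmt]
  rw [hstep, foldl_stepB_run m a (pvFlush st) 1]
  have : (1 : Int) + (m : Int) = ((m + 1 : Nat) : Int) := by push_cast; ring
  rw [this]

lemma foldl_stepB_flatMap (cnt : Char → Nat) :
    ∀ (as : List Char), as.Nodup →
    ∀ (st : List String × Option (Char × Int)), (∀ a ∈ as, pvRunNe st a) →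
    pvFlush ((as.flatMap (fun a => List.replicate (cnt a) a)).foldl pvStepB st) =
      pvFlush st ++ as.filterMap (fun a =>
        if cnt a = 0 then none else some (pvFmt a (cnt a))) := by
  intro as
  induction as with
  | nil => intro _ st _; simp
  | cons a rest ih =>
    intro hnd st hrun
    rw [List.flatMap_cons, List.foldl_append]
    by_cases h0 : cnt a = 0
    · simp only [h0, List.replicate_zero, List.foldl_nil]
      rw [ih (List.nodup_cons.mp hnd).2 st (fun a' ha' => hrun a' (List.mem_cons_of_mem _ ha'))]
      simp [h0]
    · rw [foldl_stepB_replicate (cnt a) a st (hrun a (by simp)) h0]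
      have hrun' : ∀ a' ∈ rest, pvRunNe (pvFlush st, some (a, ((cnt a : Nat) : Int))) a' := by
        intro a' ha' k n hkn
        simp only at hkn
        injection hkn with h1
        injection h1 with hk _
        subst hk
        rintro rfl
        exact (List.nodup_cons.mp hnd).1 ha'
      rw [ih (List.nodup_cons.mp hnd).2 _ hrun']
      simp only [pvFlush, List.filterMap_cons, if_neg h0]
      simp [List.append_assoc]

-- counts of a flatMap of replicates
lemma count_flatMap_replicate (cnt : Char → Nat) :
    ∀ (as : List Char), as.Nodup → ∀ b,
    (as.flatMap (fun a => List.replicate (cnt a) a)).count b =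
      if b ∈ as then cnt b else 0 := by
  intro as
  induction as with
  | nil => simp
  | cons a rest ih =>
    intro hnd b
    rw [List.flatMap_cons, List.count_append, List.count_replicate,
      ih (List.nodup_cons.mp hnd).2 b]
    by_cases hb : b = a
    · subst hb
      have : b ∉ rest := (List.nodup_cons.mp hnd).1
      simp [this]
    · simp [hb, Ne.symm hb]

-- flatMap of replicates over a strictly increasing list is weakly sorted
lemma pairwise_flatMap_replicate (cnt : Char → Nat) :
    ∀ (as : List Char), as.Pairwise (· < ·) →
    (as.flatMap (fun a => List.replicate (cnt a) a)).Pairwise (· ≤ ·) := by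
  intro as
  induction as with
  | nil => simp
  | cons a rest ih =>
    intro hp
    rw [List.flatMap_cons, List.pairwise_append]
    refine ⟨?_, ih (List.pairwise_cons.mp hp).2, ?_⟩
    · rw [List.pairwise_replicate]
      right
      exact le_refl a
    · intro x hx y hy
      have hxa : x = a := List.eq_of_mem_replicate hx
      obtain ⟨a', ha', hy'⟩ := List.mem_flatMap.mp hy
      have hya : y = a' := List.eq_of_mem_replicate hy'
      have hlt := (List.pairwise_cons.mp hp).1 a' ha'
      rw [hxa, hya]
      exact le_of_lt hlt

-- the main equivalence, stated over the lowered character list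
lemma pv_main (low : List Char) :
    (if (pyAlphabets.foldl
          (fun d al => (PySem.List.sorted low (fun c => c) false).foldl (pvStepA al) d)
          PySem.Dict.empty).items = [] then ""
     else PySem.Str.join ""
       ((pyAlphabets.foldl
          (fun d al => (PySem.List.sorted low (fun c => c) false).foldl (pvStepA al) d)
          PySem.Dict.empty).items.map (fun p => String.mk (PySem.Int.toChars p.2 ++ [p.1])))) =
    PySem.Str.join ""
      (pvFlush (((PySem.List.sorted (low.filter (fun c => 'a' ≤ c && c ≤ 'z')) (fun c => c) false).foldl
        pvStepB ([], none)))) := by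
  have hitems : (pyAlphabets.foldl
      (fun d al => (PySem.List.sorted low (fun c => c) false).foldl (pvStepA al) d)
      PySem.Dict.empty).items =
      pyAlphabets.filterMap (fun a =>
        if (PySem.List.sorted low (fun c => c) false).count a = 0 then none
        else some (a, ((PySem.List.sorted low (fun c => c) false).count a : Int))) := by
    have h := foldl_outer (PySem.List.sorted low (fun c => c) false) pyAlphabets
      nodup_pyAlphabets PySem.Dict.empty (by intro a _; simp)
    simpa using h
  -- counts: sorted low vs filtered low agree on alphabet letters
  have hcA : ∀ a, (PySem.List.sorted low (fun c => c) false).count a = low.count a := by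
    intro a
    exact (PySem.List.sorted_perm low (fun c => c) false).count_eq a
  have hcF : ∀ a ∈ pyAlphabets,
      (low.filter (fun c => 'a' ≤ c && c ≤ 'z')).count a = low.count a := by
    intro a ha
    obtain ⟨h1, h2⟩ := (mem_pyAlphabets a).mp ha
    rw [List.count_filter]
    simp [h1, h2]
  -- B's sorted letters are the alphabet runs
  have hperm : (pyAlphabets.flatMap
      (fun a => List.replicate ((low.filter (fun c => 'a' ≤ c && c ≤ 'z')).count a) a)).Perm
      (low.filter (fun c => 'a' ≤ c && c ≤ 'z')) := by
    rw [List.perm_iff_count]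
    intro b
    rw [count_flatMap_replicate _ pyAlphabets nodup_pyAlphabets b]
    by_cases hb : b ∈ pyAlphabets
    · simp [hb]
    · rw [if_neg hb]
      symm
      rw [List.count_eq_zero]
      intro hmem
      have hp := List.of_mem_filter hmem
      rw [mem_pyAlphabets] at hb
      simp only [Bool.and_eq_true, decide_eq_true_eq] at hp
      exact hb hp
  have hletters : PySem.List.sorted (low.filter (fun c => 'a' ≤ c && c ≤ 'z')) (fun c => c) false =
      pyAlphabets.flatMap
        (fun a => List.replicate ((low.filter (fun c => 'a' ≤ c && c ≤ 'z')).count a) a) :=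
    PySem.List.sorted_id_eq_of_perm_of_pairwise _ _ hperm
      (pairwise_flatMap_replicate _ pyAlphabets pairwise_lt_pyAlphabets)
  have hB : pvFlush (((PySem.List.sorted (low.filter (fun c => 'a' ≤ c && c ≤ 'z')) (fun c => c) false).foldl
      pvStepB ([], none))) =
      pyAlphabets.filterMap (fun a =>
        if (low.filter (fun c => 'a' ≤ c && c ≤ 'z')).count a = 0 then none
        else some (pvFmt a ((low.filter (fun c => 'a' ≤ c && c ≤ 'z')).count a))) := by
    rw [hletters]
    have h := foldl_stepB_flatMap (fun a => (low.filter (fun c => 'a' ≤ c && c ≤ 'z')).count a)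
      pyAlphabets nodup_pyAlphabets ([], none)
      (by intro a _ k n hkn; simp at hkn)
    simpa [pvFlush] using h
  -- the two item lists correspond
  have hmap : (pyAlphabets.filterMap (fun a =>
        if (PySem.List.sorted low (fun c => c) false).count a = 0 then none
        else some (a, ((PySem.List.sorted low (fun c => c) false).count a : Int)))).map
        (fun p => String.mk (PySem.Int.toChars p.2 ++ [p.1])) =
      pyAlphabets.filterMap (fun a =>
        if (low.filter (fun c => 'a' ≤ c && c ≤ 'z')).count a = 0 then none
        else some (pvFmt a ((low.filter (fun c => 'a' ≤ c && c ≤ 'z')).count a))) := by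
    rw [List.map_filterMap]
    apply List.filterMap_congr
    intro a ha
    have he : (PySem.List.sorted low (fun c => c) false).count a =
        (low.filter (fun c => 'a' ≤ c && c ≤ 'z')).count a := by
      rw [hcA a, hcF a ha]
    rw [he]
    by_cases h0 : (low.filter (fun c => 'a' ≤ c && c ≤ 'z')).count a = 0
    · simp [h0]
    · simp [h0, pvFmt]
  rw [hitems, hB, ← hmap]
  by_cases hL : (pyAlphabets.filterMap (fun a =>
      if (PySem.List.sorted low (fun c => c) false).count a = 0 then none
      else some (a, ((PySem.List.sorted low (fun c => c) false).count a : Int)))) = []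
  · rw [if_pos hL, hL]
    rfl
  · rw [if_neg hL]

-- ===== VERDICT (by name: the statement is the Claim_ definition above) =====
theorem string_letter_count_spec : Claim_equal_string_letter_count := by
  intro s _
  show string_letter_count s = string_letter_count_alt s
  exact pv_main ((PySem.Str.lower s).toList)
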